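-- pv_equiv track=rewrite | github.com/BionicAlligator/AoC_2021 | Day04/day04.py | check_for_winners
-- ===== SOURCE A (Python) =====
-- def all_marked(row_or_column):
--     return all(marked for (_, marked) in row_or_column)
--
-- def transpose(board):
--     return list(map(list, zip(*board)))
--
-- def board_is_winner(board):
--     for row in board:
--         if all_marked(row):
--             return True
--
--     for column in transpose(board):
--         if all_marked(column):
--             return True
--
--     return False
--
-- def check_for_winners(boards):
--     non_winning_boards = []
--     winning_boards = []
--
--     for board_num in range(0, len(boards)):
--         board = boards.pop()
--
--         if board_is_winner(board):
--             winning_boards.append(board)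
--         else:
--             non_winning_boards.append(board)
--
--     return winning_boards, non_winning_boards
-- ===== SOURCE B (Python) =====
-- def _is_winner(board):
--     # One sweep over the rows: track whether any row is fully marked, and
--     # keep per-column flags by AND-ing each row into them (zip truncates
--     # to the shortest row, matching zip(*board)'s column set).
--     if not board:
--         return False
--     m = min(len(row) for row in board)
--     col_ok = [True] * m
--     any_row_complete = False
--     for row in board:
--         if all(marked for _, marked in row):
--             any_row_complete = True
--         col_ok = [ok and marked for ok, (_, marked) in zip(col_ok, row)]
--     return any_row_complete or any(col_ok)
--
-- def check_for_winners(boards):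
--     winning_boards = []
--     non_winning_boards = []
--     for board in reversed(boards):
--         (winning_boards if _is_winner(board) else non_winning_boards).append(board)
--     boards.clear()  # preserve A's emptying of the argument
--     return winning_boards, non_winning_boards
-- ===== Notes on version B (the rewrite author's own statement) =====
-- stated objective: alternative
-- what changed: The winner test no longer builds a transposed copy of the board and scans rows then columns; instead one sweep over the rows keeps a row-complete flag and per-column boolean flags AND-ed row by row.
import Mathlib
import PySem

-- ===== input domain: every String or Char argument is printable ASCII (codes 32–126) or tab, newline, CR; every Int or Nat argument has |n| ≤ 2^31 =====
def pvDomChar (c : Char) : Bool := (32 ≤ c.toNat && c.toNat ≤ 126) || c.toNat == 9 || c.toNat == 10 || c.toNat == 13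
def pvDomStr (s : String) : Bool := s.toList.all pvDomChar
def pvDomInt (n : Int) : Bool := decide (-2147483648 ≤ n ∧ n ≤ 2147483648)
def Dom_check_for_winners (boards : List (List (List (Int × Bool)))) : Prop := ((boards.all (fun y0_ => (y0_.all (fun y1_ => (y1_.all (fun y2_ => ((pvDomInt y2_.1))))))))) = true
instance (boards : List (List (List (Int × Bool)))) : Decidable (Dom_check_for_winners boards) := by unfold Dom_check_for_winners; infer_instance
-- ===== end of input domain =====

-- B replaces A's row-scan-then-transposed-copy-scan winner test with one sweep keeping a
-- row-complete flag and AND-ed per-column flags (objective: alternative, no transposed copy).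
-- Python A empties its argument list in place (pop loop); B does the same (clear); the
-- equivalence proved here is about the RETURN value only.


-- ===== PORT A =====
def all_marked (row_or_column : List (Int × Bool)) : Bool :=
  row_or_column.all (fun p => p.2)

-- zip(*board): columns 0..min(row lengths)-1, column j = [row[j] for row in board];
-- exact for board = [] (zip() is empty) and for jagged boards (zip truncates).
def transposeA (board : List (List (Int × Bool))) : List (List (Int × Bool)) :=
  match board with
  | [] => []
  | r0 :: rs =>
      (List.range (rs.foldl (fun m r => min m r.length) r0.length)).map
        (fun j => (r0 :: rs).map (fun r => r.getD j (0, false)))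

def board_is_winner (board : List (List (Int × Bool))) : Bool :=
  board.any all_marked || (transposeA board).any all_marked

def check_for_winners (boards : List (List (List (Int × Bool)))) : (List (List (List (Int × Bool)))) × (List (List (List (Int × Bool)))) :=
  -- for board_num in range(len(boards)): board = boards.pop(); append to one of the two lists
  boards.reverse.foldl
    (fun acc board =>
      if board_is_winner board then (acc.1 ++ [board], acc.2)
      else (acc.1, acc.2 ++ [board]))
    ([], [])

-- ===== PORT B =====
def altIsWinner (board : List (List (Int × Bool))) : Bool :=
  match board with
  | [] => false
  | r0 :: rs =>
      -- m = min(len(row) for row in board)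
      let m := rs.foldl (fun m r => min m r.length) r0.length
      let res := (r0 :: rs).foldl
        (fun (st : Bool × List Bool) row =>
          (st.1 || row.all (fun p => p.2),
           List.zipWith (fun ok p => ok && p.2) st.2 row))
        (false, List.replicate m true)
      res.1 || res.2.any id

def check_for_winners_alt (boards : List (List (List (Int × Bool)))) : (List (List (List (Int × Bool)))) × (List (List (List (Int × Bool)))) :=
  boards.reverse.foldl
    (fun acc board =>
      if altIsWinner board then (acc.1 ++ [board], acc.2)
      else (acc.1, acc.2 ++ [board]))
    ([], [])

-- ===== PRECONDITION & SPEC =====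
def Spec_check_for_winners (boards : List (List (List (Int × Bool)))) (out : (List (List (List (Int × Bool)))) × (List (List (List (Int × Bool))))) : Prop := out = check_for_winners_alt boards
instance (boards : List (List (List (Int × Bool)))) (out : (List (List (List (Int × Bool)))) × (List (List (List (Int × Bool))))) : Decidable (Spec_check_for_winners boards out) := by unfold Spec_check_for_winners; infer_instance

-- ===== CLAIM (what is proved, stated in full; the proofs are below) =====
def Claim_equal_check_for_winners : Prop := ∀ (boards : List (List (List (Int × Bool)))), Dom_check_for_winners boards → Spec_check_for_winners boards (check_for_winners boards)

-- ===== LEMMAS AND PROOFS =====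

-- the min-fold is a lower bound for every row length (and for r0's)
theorem minfold_le {α : Type} (rs : List (List α)) (n : Nat) :
    rs.foldl (fun m r => min m r.length) n ≤ n ∧
      ∀ r ∈ rs, rs.foldl (fun m r => min m r.length) n ≤ r.length := by
  induction rs generalizing n with
  | nil => simp
  | cons r rs ih =>
    have h := ih (min n r.length)
    refine ⟨le_trans h.1 (min_le_left _ _), ?_⟩
    intro r' hr'
    rcases List.mem_cons.mp hr' with h' | h'
    · subst h'; exact le_trans h.1 (min_le_right _ _)
    · exact h.2 _ h'

-- a fold over a pair with independent components splits
theorem foldl_pair {α β γ : Type} (l : List α) (g : β → α → β) (h : γ → α → γ)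
    (a : β) (b : γ) :
    l.foldl (fun st x => (g st.1 x, h st.2 x)) (a, b) = (l.foldl g a, l.foldl h b) := by
  induction l generalizing a b with
  | nil => rfl
  | cons x xs ih => simpa using ih (g a x) (h b x)

-- the boolean-or fold is `any`
theorem foldl_or {α : Type} (p : α → Bool) (l : List α) (b : Bool) :
    l.foldl (fun s x => s || p x) b = (b || l.any p) := by
  induction l generalizing b with
  | nil => simp
  | cons x xs ih => simp [ih, Bool.or_assoc]

-- the column-flag fold computed pointwise
theorem colFold_eq (rows : List (List (Int × Bool))) (c : List Bool)
    (h : ∀ r ∈ rows, c.length ≤ r.length) :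
    rows.foldl (fun c row => List.zipWith (fun ok p => ok && p.2) c row) c
      = (List.range c.length).map
          (fun j => c.getD j false && rows.all (fun r => (r.getD j (0, false)).2)) := by
  induction rows generalizing c with
  | nil =>
    simp only [List.foldl_nil, List.all_nil, Bool.and_true]
    apply List.ext_getElem
    · simp
    · intro i h1 h2
      simp at h2
      simp [List.getD, h2]
  | cons r rs ih =>
    have hcr : c.length ≤ r.length := h r (by simp)
    have hlen : (List.zipWith (fun ok p => ok && p.2) c r).length = c.length := by
      simp [List.length_zipWith]; omega
    have ih' := ih (List.zipWith (fun ok p => ok && p.2) c r)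
      (by intro r' hr'; rw [hlen]; exact h r' (by simp [hr']))
    simp only [List.foldl_cons, ih', hlen]
    apply List.map_congr_left
    intro j hj
    have hj' : j < c.length := by simpa using hj
    have hjr : j < r.length := lt_of_lt_of_le hj' hcr
    have hz : (List.zipWith (fun ok p => ok && p.2) c r).getD j false
        = (c.getD j false && (r.getD j (0, false)).2) := by
      rw [List.getD_eq_getElem _ _ (by omega), List.getD_eq_getElem _ _ hj',
        List.getD_eq_getElem _ _ hjr, List.getElem_zipWith]
    rw [hz]
    simp [Bool.and_assoc]

-- `any` respects pointwise-equal predicates on the list's members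
theorem any_congr_mem {α : Type} (p q : α → Bool) :
    ∀ l : List α, (∀ x ∈ l, p x = q x) → l.any p = l.any q := by
  intro l
  induction l with
  | nil => intro _; rfl
  | cons x xs ih =>
    intro h
    simp only [List.any_cons]
    rw [h x (by simp), ih (fun y hy => h y (by simp [hy]))]

-- the two winner tests agree on every board
theorem winner_eq (board : List (List (Int × Bool))) :
    board_is_winner board = altIsWinner board := by
  cases board with
  | nil => simp [board_is_winner, altIsWinner, transposeA]
  | cons r0 rs =>
    simp only [board_is_winner, altIsWinner, transposeA]
    set m := rs.foldl (fun m r => min m r.length) r0.length with hm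
    have hmin := minfold_le rs r0.length
    have hle : ∀ r ∈ r0 :: rs, m ≤ r.length := by
      intro r hr
      rcases List.mem_cons.mp hr with h | h
      · subst h; exact hmin.1
      · exact hmin.2 _ h
    rw [foldl_pair (r0 :: rs) (fun s row => s || row.all (fun p => p.2))
      (fun c row => List.zipWith (fun ok p => ok && p.2) c row) false (List.replicate m true)]
    rw [foldl_or, colFold_eq (r0 :: rs) (List.replicate m true)
      (by simpa using hle)]
    simp only [List.length_replicate, Bool.false_or, List.any_map, Function.comp_def]
    congr 1
    all_goals
      apply any_congr_mem
      intro j hj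
      have hj' : j < m := by simpa using hj
      have hrep : (List.replicate m true)[j]?.getD false = true := by
        simp [hj']
      simp [all_marked, List.all_map, Function.comp_def, hrep]

-- ===== VERDICT (by name: the statement is the Claim_ definition above) =====
theorem check_for_winners_spec : Claim_equal_check_for_winners := by
  intro boards _
  unfold Spec_check_for_winners check_for_winners check_for_winners_alt
  congr 1
  funext acc board
  rw [winner_eq]
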